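-- pv_equiv track=rewrite | github.com/in24/GrupuGenerators | main.py | grupas
-- ===== SOURCE A (Python) =====
-- def grupas(cilveku_saraksts,grupu_skaits):
-- 	sadalijums = {}
-- 	cilveki_grupa = len(cilveku_saraksts)//grupu_skaits
-- 	atlikums = len(cilveku_saraksts)%grupu_skaits
-- 	if atlikums > 0:
-- 		daudzums = cilveki_grupa+1
-- 		atlikums -= 1
-- 	else:
-- 		daudzums = cilveki_grupa
-- 	numurs = 1
-- 	for cilveks in cilveku_saraksts:
-- 		sadalijums[cilveks] = numurs
-- 		daudzums -= 1
-- 		if daudzums == 0: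
-- 			numurs += 1
-- 			if atlikums > 0:
-- 				daudzums = cilveki_grupa+1
-- 				atlikums -= 1
-- 			else:
-- 				daudzums = cilveki_grupa
--
-- 	return sadalijums
-- ===== SOURCE B (Python) =====
-- def grupas(cilveku_saraksts, grupu_skaits):
--     q, r = divmod(len(cilveku_saraksts), grupu_skaits)
--     sadalijums = {}
--     it = iter(cilveku_saraksts)
--     atlicis = len(cilveku_saraksts)
--     numurs = 0
--     while atlicis > 0 and numurs < grupu_skaits:
--         numurs += 1
--         size = q + 1 if numurs <= r else q
--         for _ in range(size):
--             sadalijums[next(it)] = numurs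
--         atlicis -= size
--     return sadalijums
-- ===== Notes on version B (the rewrite author's own statement) =====
-- stated objective: alternative
-- what changed: replaces A's single-pass running countdown/refresh state machine with a precomputed divmod size table and a two-level chunked pass over an iterator
-- outside the precondition, e.g. on grupas(['a', 'b'], -1): A returns {'a': 1, 'b': 1}, B returns {}; on grupas(['a', 'b'], 0): A raises ZeroDivisionError, B raises ZeroDivisionError
import Mathlib
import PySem

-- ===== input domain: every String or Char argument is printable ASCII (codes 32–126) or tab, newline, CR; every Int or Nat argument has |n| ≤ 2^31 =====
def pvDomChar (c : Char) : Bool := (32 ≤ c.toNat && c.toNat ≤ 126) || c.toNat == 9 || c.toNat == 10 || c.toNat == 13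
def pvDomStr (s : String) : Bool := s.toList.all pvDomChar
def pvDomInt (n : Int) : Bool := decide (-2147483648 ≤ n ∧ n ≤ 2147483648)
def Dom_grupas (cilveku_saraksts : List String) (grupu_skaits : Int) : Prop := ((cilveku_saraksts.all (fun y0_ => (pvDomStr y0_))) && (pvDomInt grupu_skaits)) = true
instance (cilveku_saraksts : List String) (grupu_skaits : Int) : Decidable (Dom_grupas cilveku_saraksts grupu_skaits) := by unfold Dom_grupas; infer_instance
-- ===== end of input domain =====

-- B replaces A's running countdown/refresh state machine with a divmod-derived
-- per-group size and a two-level chunked pass over an iterator (alternative decomposition, same cost).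

-- ===== PORT A =====
-- A's for-loop over the people, carrying (dict, daudzums, numurs, atlikums);
-- cilveki_grupa (the fixed quotient) is the first parameter q.
def grupasLoop (q : Int) : List String → PySem.Dict String Int → Int → Int → Int → PySem.Dict String Int
  | [], sadalijums, _, _, _ => sadalijums
  | cilveks :: rest, sadalijums, daudzums, numurs, atlikums =>
    let sadalijums := sadalijums.insert cilveks numurs
    let daudzums := daudzums - 1
    if daudzums == 0 then
      if atlikums > 0 then grupasLoop q rest sadalijums (q + 1) (numurs + 1) (atlikums - 1)
      else grupasLoop q rest sadalijums q (numurs + 1) atlikums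
    else grupasLoop q rest sadalijums daudzums numurs atlikums

def grupas (cilveku_saraksts : List String) (grupu_skaits : Int) : List (String × Int) :=
  let n : Int := cilveku_saraksts.length
  let cilveki_grupa := PySem.Int.floordiv n grupu_skaits
  let atlikums := PySem.Int.mod n grupu_skaits
  if atlikums > 0 then
    (grupasLoop cilveki_grupa cilveku_saraksts PySem.Dict.empty (cilveki_grupa + 1) 1 (atlikums - 1)).items
  else
    (grupasLoop cilveki_grupa cilveku_saraksts PySem.Dict.empty cilveki_grupa 1 atlikums).items

-- ===== PORT B =====
-- inner loop: 'for _ in range(size): sadalijums[next(it)] = numurs'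
-- (next(it) on an exhausted iterator cannot occur under Pre_; the port then just stops)
def altInner (numurs : Int) : Nat → List String → PySem.Dict String Int → PySem.Dict String Int × List String
  | 0, it, sadalijums => (sadalijums, it)
  | _ + 1, [], sadalijums => (sadalijums, [])
  | k + 1, x :: it, sadalijums => altInner numurs k it (sadalijums.insert x numurs)

-- outer loop: 'while atlicis > 0 and numurs < grupu_skaits'
def altLoop (q r g : Int) (atlicis numurs : Int) (it : List String) (sadalijums : PySem.Dict String Int) : PySem.Dict String Int :=
  if atlicis > 0 ∧ numurs < g then
    let numurs' := numurs + 1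
    let size := if numurs' ≤ r then q + 1 else q
    let p := altInner numurs' size.toNat it sadalijums
    altLoop q r g (atlicis - size) numurs' p.2 p.1
  else sadalijums
termination_by (g - numurs).toNat
decreasing_by omega

def grupas_alt (cilveku_saraksts : List String) (grupu_skaits : Int) : List (String × Int) :=
  let n : Int := cilveku_saraksts.length
  let q := PySem.Int.floordiv n grupu_skaits
  let r := PySem.Int.mod n grupu_skaits
  (altLoop q r grupu_skaits n 0 cilveku_saraksts PySem.Dict.empty).items

-- ===== PRECONDITION & SPEC =====
-- Pre_ excludes grupu_skaits = 0, where A raises ZeroDivisionError (so does B), and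
-- grupu_skaits < 0, outside the task's natural domain, where A's value (everybody in
-- group 1) is an artefact of its never-zero countdown and B returns the empty dict.
def Pre_grupas (cilveku_saraksts : List String) (grupu_skaits : Int) : Prop := 1 ≤ grupu_skaits
instance (cilveku_saraksts : List String) (grupu_skaits : Int) : Decidable (Pre_grupas cilveku_saraksts grupu_skaits) := by unfold Pre_grupas; infer_instance
def pvWitness_grupas : List String × Int := (["anna", "bob", "cils"], 2)

def Spec_grupas (cilveku_saraksts : List String) (grupu_skaits : Int) (out : List (String × Int)) : Prop := out = grupas_alt cilveku_saraksts grupu_skaits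
instance (cilveku_saraksts : List String) (grupu_skaits : Int) (out : List (String × Int)) : Decidable (Spec_grupas cilveku_saraksts grupu_skaits out) := by unfold Spec_grupas; infer_instance

-- ===== CLAIM (what is proved, stated in full; the proofs are below) =====
def Claim_equal_grupas : Prop := ∀ (cilveku_saraksts : List String) (grupu_skaits : Int), Dom_grupas cilveku_saraksts grupu_skaits → Pre_grupas cilveku_saraksts grupu_skaits → Spec_grupas cilveku_saraksts grupu_skaits (grupas cilveku_saraksts grupu_skaits)

-- ===== LEMMAS AND PROOFS =====

-- the group-number stream A's state machine emits (fuel = people still to place)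
def numsA (q : Int) : Nat → Int → Int → Int → List Int
  | 0, _, _, _ => []
  | f + 1, daudzums, numurs, atlikums =>
    numurs ::
      (if daudzums - 1 == 0 then
        if atlikums > 0 then numsA q f (q + 1) (numurs + 1) (atlikums - 1)
        else numsA q f q (numurs + 1) atlikums
      else numsA q f (daudzums - 1) numurs atlikums)

-- the group-number stream of a size table
def groupNums : List Int → Int → List Int
  | [], _ => []
  | s :: ss, k => List.replicate s.toNat k ++ groupNums ss (k + 1)

theorem grupasLoop_eq_foldl (q : Int) (xs : List String) :
    ∀ (d : PySem.Dict String Int) (daudz num atl : Int),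
      grupasLoop q xs d daudz num atl =
        (xs.zip (numsA q xs.length daudz num atl)).foldl (fun acc p => acc.insert p.1 p.2) d := by
  induction xs with
  | nil => intro d daudz num atl; simp [grupasLoop, numsA]
  | cons x xs ih =>
    intro d daudz num atl
    simp only [grupasLoop, numsA, List.length_cons]
    split_ifs <;> simp [ih]

-- proof-side helper: the chunked pass written over an explicit size table
def altOuter : List Int → Int → List String → PySem.Dict String Int → PySem.Dict String Int
  | [], _, _, sadalijums => sadalijums
  | size :: sizes, numurs, it, sadalijums =>
    let p := altInner numurs size.toNat it sadalijums
    altOuter sizes (numurs + 1) p.2 p.1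

theorem altInner_eq (num : Int) (k : Nat) :
    ∀ (it : List String) (d : PySem.Dict String Int),
      altInner num k it d =
        ((it.zip (List.replicate k num)).foldl (fun acc p => acc.insert p.1 p.2) d, it.drop k) := by
  induction k with
  | zero => intro it d; simp [altInner]
  | succ k ih =>
    intro it d
    cases it with
    | nil => simp [altInner]
    | cons x it => simp [altInner, List.replicate_succ, ih]

theorem zip_replicate_append (k : Nat) (num : Int) :
    ∀ (it : List String) (rest : List Int),
      it.zip (List.replicate k num ++ rest) =
        it.zip (List.replicate k num) ++ (it.drop k).zip rest := by
  induction k with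
  | zero => intro it rest; simp
  | succ k ih =>
    intro it rest
    cases it with
    | nil => simp
    | cons x it => simp [List.replicate_succ, ih]

theorem altOuter_eq (sizes : List Int) :
    ∀ (num : Int) (it : List String) (d : PySem.Dict String Int),
      altOuter sizes num it d =
        (it.zip (groupNums sizes num)).foldl (fun acc p => acc.insert p.1 p.2) d := by
  induction sizes with
  | nil => intro num it d; simp [altOuter, groupNums]
  | cons s ss ih =>
    intro num it d
    simp only [altOuter, groupNums, altInner_eq, ih, zip_replicate_append, List.foldl_append]

theorem altOuter_replicate_zero (m : Nat) :
    ∀ (num : Int) (it : List String) (d : PySem.Dict String Int),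
      altOuter (List.replicate m 0) num it d = d := by
  induction m with
  | zero => intro num it d; simp [altOuter]
  | succ m ih => intro num it d; simp [List.replicate_succ, altOuter, altInner, ih]

-- phase 2 of the while loop: only plain groups of size q remain
theorem altLoop_pure (q r g : Int) (hq : 0 ≤ q) (m : Nat) :
    ∀ (it : List String) (d : PySem.Dict String Int), r ≤ g - m →
      altLoop q r g ((m : Int) * q) (g - m) it d = altOuter (List.replicate m q) (g - m + 1) it d := by
  induction m with
  | zero =>
    intro it d _
    rw [altLoop]
    simp [altOuter]
  | succ m ih =>
    intro it d hr
    rcases Int.le_iff_lt_or_eq.mp hq with hpos | hzero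
    · rw [altLoop]
      rw [if_pos ⟨by push_cast; nlinarith [Int.natCast_nonneg m], by omega⟩]
      simp only []
      rw [if_neg (by omega : ¬ (g - (m + 1 : Nat) + 1 ≤ r))]
      have h1 : ((m + 1 : Nat) : Int) * q - q = (m : Int) * q := by push_cast; ring
      have h2 : g - ((m + 1 : Nat) : Int) + 1 = g - (m : Int) := by push_cast; ring
      rw [h1, h2, ih _ _ (by omega)]
      simp [altOuter, List.replicate_succ]
    · have hq0 : q = 0 := hzero.symm
      subst hq0
      rw [altLoop]
      rw [if_neg (by simp)]
      rw [altOuter_replicate_zero]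

-- phase 1 of the while loop: j oversized groups of size q+1 remain, then the plain ones
theorem altLoop_extra (q r g : Int) (hq : 0 ≤ q) (hrg : r ≤ g) (j : Nat) :
    ∀ (it : List String) (d : PySem.Dict String Int), (j : Int) ≤ r →
      altLoop q r g ((j : Int) * (q + 1) + (g - r) * q) (r - j) it d =
        altOuter (List.replicate j (q + 1) ++ List.replicate (g - r).toNat q) (r - j + 1) it d := by
  induction j with
  | zero =>
    intro it d _
    have h1 : ((0 : Nat) : Int) * (q + 1) + (g - r) * q = ((g - r).toNat : Int) * q := by
      have : ((g - r).toNat : Int) = g - r := by omega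
      rw [this]; push_cast; ring
    have h2 : r - ((0 : Nat) : Int) = g - ((g - r).toNat : Nat) := by omega
    rw [h1, h2, altLoop_pure q r g hq (g - r).toNat it d (by omega)]
    simp
  | succ j ih =>
    intro it d hj
    rw [altLoop]
    rw [if_pos ⟨by push_cast; nlinarith [Int.natCast_nonneg j, mul_nonneg (sub_nonneg.mpr hrg) hq], by omega⟩]
    simp only []
    rw [if_pos (by omega : r - ((j + 1 : Nat) : Int) + 1 ≤ r)]
    have h1 : ((j + 1 : Nat) : Int) * (q + 1) + (g - r) * q - (q + 1)
        = (j : Int) * (q + 1) + (g - r) * q := by push_cast; ring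
    have h2 : r - ((j + 1 : Nat) : Int) + 1 = r - (j : Int) := by push_cast; ring
    rw [h1, h2, ih _ _ (by omega)]
    simp [altOuter, List.replicate_succ]

theorem groupNums_replicate_zero (m : Nat) : ∀ (k : Int), groupNums (List.replicate m 0) k = [] := by
  induction m with
  | zero => intro k; simp [groupNums]
  | succ m ih => intro k; simp [List.replicate_succ, groupNums, ih]

-- consuming one whole group of size dn ≥ 1 from A's state machine
theorem numsA_group (q : Int) (dn : Nat) (hd : 1 ≤ dn) :
    ∀ (k : Nat) (num atl : Int),
      numsA q (dn + k) (dn : Int) num atl =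
        List.replicate dn num ++
          (if atl > 0 then numsA q k (q + 1) (num + 1) (atl - 1)
           else numsA q k q (num + 1) atl) := by
  induction dn with
  | zero => omega
  | succ dn ih =>
    intro k num atl
    rcases Nat.eq_zero_or_pos dn with h0 | hpos
    · subst h0
      have h1k : 1 + k = k + 1 := by omega
      rw [h1k]
      simp [numsA, List.replicate_succ]
    · have hne : ¬ (((dn : Int) + 1) - 1 == 0) := by
        simp; omega
      have : (dn : Nat) + 1 + k = (dn + k) + 1 := by omega
      rw [this]
      simp only [numsA, Nat.cast_add, Nat.cast_one, hne, if_neg (by simpa using hne)]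
      have h1 : ((dn : Int) + 1) - 1 = (dn : Int) := by ring
      rw [h1, ih hpos k num atl]
      simp [List.replicate_succ]

-- the pure phase: m groups of size q remain, no extras
theorem numsA_pure (q : Int) (hq : 0 ≤ q) (m : Nat) :
    ∀ (num : Int), numsA q (m * q.toNat) q num 0 = groupNums (List.replicate m q) num := by
  induction m with
  | zero => intro num; simp [numsA, groupNums]
  | succ m ih =>
    intro num
    rcases Int.le_iff_lt_or_eq.mp hq with hpos | hzero
    · have hqn : (q.toNat : Int) = q := by omega
      have h1 : 1 ≤ q.toNat := by omega
      have : (m + 1) * q.toNat = q.toNat + m * q.toNat := by ring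
      rw [this]
      have := numsA_group q q.toNat h1 (m * q.toNat) num 0
      rw [hqn] at this
      rw [this]
      simp only [if_neg (by omega : ¬ (0:Int) > 0)]
      rw [ih]
      simp [groupNums, List.replicate_succ, hqn]
    · have hq0 : q = 0 := hzero.symm
      subst hq0
      simp [numsA, groupNums_replicate_zero, List.replicate_succ, groupNums]
  -- note: Int.toNat 0 = 0 so fuel is 0 in the q = 0 branch

-- the mixed phase: aN+1 extra groups of size q+1 remain (the current one loaded), then m of size q
theorem numsA_mixed (q : Int) (hq : 0 ≤ q) (aN : Nat) :
    ∀ (m : Nat) (num : Int),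
      numsA q ((aN + 1) * (q.toNat + 1) + m * q.toNat) (q + 1) num (aN : Int) =
        groupNums (List.replicate (aN + 1) (q + 1) ++ List.replicate m q) num := by
  induction aN with
  | zero =>
    intro m num
    have hqn : ((q.toNat + 1 : Nat) : Int) = q + 1 := by omega
    have := numsA_group q (q.toNat + 1) (by omega) (m * q.toNat) num 0
    rw [hqn] at this
    have hfuel : (0 + 1) * (q.toNat + 1) + m * q.toNat = (q.toNat + 1) + m * q.toNat := by ring
    rw [hfuel, Nat.cast_zero, this]
    simp only [if_neg (by omega : ¬ (0:Int) > 0)]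
    rw [numsA_pure q hq m]
    have hto : (q + 1).toNat = q.toNat + 1 := by omega
    simp [groupNums, List.replicate_succ, hto]
  | succ aN ih =>
    intro m num
    have hqn : ((q.toNat + 1 : Nat) : Int) = q + 1 := by omega
    have := numsA_group q (q.toNat + 1) (by omega) ((aN + 1) * (q.toNat + 1) + m * q.toNat) num ((aN : Int) + 1)
    rw [hqn] at this
    have hfuel : (aN + 1 + 1) * (q.toNat + 1) + m * q.toNat
        = (q.toNat + 1) + ((aN + 1) * (q.toNat + 1) + m * q.toNat) := by ring
    rw [hfuel, Nat.cast_add, Nat.cast_one, this]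
    simp only [if_pos (by omega : ((aN : Int) + 1) > 0)]
    have ha : (aN : Int) + 1 - 1 = (aN : Int) := by ring
    rw [ha, ih m (num + 1)]
    have hto : (q + 1).toNat = q.toNat + 1 := by omega
    simp [groupNums, List.replicate_succ, hto]

-- A's emitted stream equals the size-table stream, for g ≥ 1
theorem nums_eq (n : Nat) (g : Int) (hg : 1 ≤ g) :
    (if PySem.Int.mod (n : Int) g > 0 then
       numsA (PySem.Int.floordiv (n : Int) g) n (PySem.Int.floordiv (n : Int) g + 1) 1 (PySem.Int.mod (n : Int) g - 1)
     else
       numsA (PySem.Int.floordiv (n : Int) g) n (PySem.Int.floordiv (n : Int) g) 1 (PySem.Int.mod (n : Int) g)) =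
    groupNums (List.replicate (PySem.Int.mod (n : Int) g).toNat (PySem.Int.floordiv (n : Int) g + 1)
      ++ List.replicate (g - PySem.Int.mod (n : Int) g).toNat (PySem.Int.floordiv (n : Int) g)) 1 := by
  set q := PySem.Int.floordiv (n : Int) g with hqdef
  set r := PySem.Int.mod (n : Int) g with hrdef
  have hgpos : 0 < g := by omega
  have hr0 : 0 ≤ r := PySem.Int.mod_nonneg _ hgpos
  have hrlt : r < g := PySem.Int.mod_lt _ hgpos
  have hsum : q * g + r = (n : Int) := PySem.Int.floordiv_mul_add_mod _ _
  have hq : 0 ≤ q := by nlinarith [hsum, hr0, hrlt]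
  by_cases hrpos : r > 0
  · rw [if_pos hrpos]
    obtain ⟨aN, haN⟩ : ∃ aN : Nat, r.toNat = aN + 1 := ⟨r.toNat - 1, by omega⟩
    have hfuel : n = (aN + 1) * (q.toNat + 1) + (g - r).toNat * q.toNat := by
      have h1 : ((aN : Int) + 1) = r := by omega
      have h2 : ((g - r).toNat : Int) = g - r := by omega
      have h3 : (q.toNat : Int) = q := by omega
      zify
      push_cast
      nlinarith [hsum]
    rw [hfuel]
    have ha : ((aN : Int)) = r - 1 := by omega
    rw [← ha, numsA_mixed q hq aN ((g - r).toNat) 1, haN]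
  · rw [if_neg hrpos]
    have hr : r = 0 := by omega
    rw [hr]
    have hfuel : n = g.toNat * q.toNat := by
      zify; push_cast
      have h2 : (g.toNat : Int) = g := by omega
      have h3 : (q.toNat : Int) = q := by omega
      nlinarith [hsum]
    rw [hfuel, numsA_pure q hq g.toNat 1]
    simp [hr]

-- bridging the while loop to the explicit size table, for g >= 1
theorem altLoop_top (cs : List String) (g : Int) (hg : 1 ≤ g) :
    altLoop (PySem.Int.floordiv (cs.length : Int) g) (PySem.Int.mod (cs.length : Int) g) g
        (cs.length : Int) 0 cs PySem.Dict.empty =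
      altOuter (List.replicate (PySem.Int.mod (cs.length : Int) g).toNat (PySem.Int.floordiv (cs.length : Int) g + 1)
          ++ List.replicate (g - PySem.Int.mod (cs.length : Int) g).toNat (PySem.Int.floordiv (cs.length : Int) g)) 1
        cs PySem.Dict.empty := by
  set q := PySem.Int.floordiv (cs.length : Int) g with hqdef
  set r := PySem.Int.mod (cs.length : Int) g with hrdef
  have hgpos : 0 < g := by omega
  have hr0 : 0 ≤ r := PySem.Int.mod_nonneg _ hgpos
  have hrlt : r < g := PySem.Int.mod_lt _ hgpos
  have hsum : q * g + r = (cs.length : Int) := PySem.Int.floordiv_mul_add_mod _ _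
  have hq : 0 ≤ q := by nlinarith
  by_cases hrpos : r > 0
  · have h0 : (0 : Int) = r - (r.toNat : Int) := by omega
    have hn : (cs.length : Int) = (r.toNat : Int) * (q + 1) + (g - r) * q := by
      have hc : (r.toNat : Int) = r := by omega
      rw [hc]; nlinarith
    rw [hn, h0, altLoop_extra q r g hq (by omega) r.toNat cs PySem.Dict.empty (by omega)]
    have h1 : r - (r.toNat : Int) + 1 = 1 := by omega
    rw [h1]
  · have hr : r = 0 := by omega
    have h0 : (0 : Int) = g - (g.toNat : Int) := by omega
    have hn : (cs.length : Int) = (g.toNat : Int) * q := by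
      have hc : (g.toNat : Int) = g := by omega
      rw [hc]; nlinarith
    rw [hn, h0, altLoop_pure q r g hq g.toNat cs PySem.Dict.empty (by omega)]
    have h1 : g - (g.toNat : Int) + 1 = 1 := by omega
    rw [h1, hr]
    simp

-- ===== VERDICT (by name: the statement is the Claim_ definition above) =====
theorem grupas_spec : Claim_equal_grupas := by
  intro cs g _ hpre
  unfold Spec_grupas grupas grupas_alt Pre_grupas at *
  simp only []
  rw [altLoop_top cs g hpre, altOuter_eq]
  have h := nums_eq cs.length g hpre
  by_cases hr : PySem.Int.mod (cs.length : Int) g > 0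
  · rw [if_pos hr]
    rw [grupasLoop_eq_foldl]
    rw [if_pos hr] at h
    rw [h]
  · rw [if_neg hr]
    rw [grupasLoop_eq_foldl]
    rw [if_neg hr] at h
    rw [h]
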